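-- pv_equiv track=rewrite | github.com/KubinGH/logia-tryhard-saga | Ye Olde/Etap 3/2013/4.py | max_2d
-- ===== SOURCE A (Python) =====
-- def max_2d(array):
--     maximum = float("-inf")
--     pos = None
--     for row, erow in enumerate(array):
--         for col, elem in enumerate(erow):
--             if elem > maximum:
--                 maximum = elem
--                 pos = (col, row)
--     return pos
-- ===== SOURCE B (Python) =====
-- def max_2d(array):
--     # Stage 1: compute the global maximum value with the builtin max over a flattened view.
--     # Stage 2: locate its first occurrence in row-major order via membership + list.index.
--     flat = [e for row in array for e in row]
--     if not flat:
--         return None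
--     m = max(flat)
--     for r, row in enumerate(array):
--         if m in row:
--             return (row.index(m), r)
-- ===== Notes on version B (the rewrite author's own statement) =====
-- stated objective: alternative
-- what changed: Replaces A's single nested scan that threads one global (maximum,pos) accumulator through every element with a two-stage algorithm: first compute the global maximum value via the builtin max over a flattened list, then locate its first row-major occurrence with a membership test per row and list.index; no running best/position state exists at all.
import Mathlib
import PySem

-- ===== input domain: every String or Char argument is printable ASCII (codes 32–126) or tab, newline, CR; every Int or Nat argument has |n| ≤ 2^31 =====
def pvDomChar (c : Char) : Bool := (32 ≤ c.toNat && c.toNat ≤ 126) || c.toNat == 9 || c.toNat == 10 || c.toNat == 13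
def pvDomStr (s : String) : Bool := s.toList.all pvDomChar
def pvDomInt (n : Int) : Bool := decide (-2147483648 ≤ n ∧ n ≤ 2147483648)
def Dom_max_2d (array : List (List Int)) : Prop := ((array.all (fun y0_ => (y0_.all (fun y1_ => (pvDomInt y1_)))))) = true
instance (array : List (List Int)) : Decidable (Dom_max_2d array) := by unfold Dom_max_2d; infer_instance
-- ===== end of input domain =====

-- B replaces A's one nested scan with a running (maximum,pos) accumulator by a two-stage
-- algorithm: builtin max of the flattened list, then a search for its first row-major
-- occurrence via per-row membership and list.index (alternative decomposition, same cost).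

-- ===== PORT A =====
-- float("-inf") is modelled as 'none' in an Option Int: all elements are Int, so
-- 'elem > maximum' is exactly 'maximum = none ∨ elem > m' — exact on Int elements.
def max_2d (array : List (List Int)) : Option (Int × Int) :=
  ((PySem.List.enumerate array).foldl
    (fun st re =>
      (PySem.List.enumerate re.2).foldl
        (fun st2 ce =>
          if (match st2.1 with | none => true | some m => decide (ce.2 > m)) then
            (some ce.2, some (ce.1, re.1))
          else st2) st)
    ((none : Option Int), (none : Option (Int × Int)))).2

-- ===== PORT B =====
-- the 'for r, row in enumerate(array): if m in row: return (row.index(m), r)' loop of Source B;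
-- inside the membership guard index? is some, so the .map returns exactly Python's pair
def findRowB (m : Int) : List (Int × List Int) → Option (Int × Int)
  | [] => none
  | (r, row) :: rest =>
    if row.contains m then (PySem.List.index? row m).map (fun c => ((c : Int), r))
    else findRowB m rest

def max_2d_alt (array : List (List Int)) : Option (Int × Int) :=
  let flat := array.flatMap (fun row => row)
  match PySem.List.max? flat (fun x => x) with
  | none => none            -- flat is empty: Source B returns None before calling max
  | some m => findRowB m (PySem.List.enumerate array)

-- ===== PRECONDITION & SPEC =====
def Spec_max_2d (array : List (List Int)) (out : Option (Int × Int)) : Prop := out = max_2d_alt array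
instance (array : List (List Int)) (out : Option (Int × Int)) : Decidable (Spec_max_2d array out) := by unfold Spec_max_2d; infer_instance

-- ===== CLAIM (what is proved, stated in full; the proofs are below) =====
def Claim_equal_max_2d : Prop := ∀ (array : List (List Int)), Dom_max_2d array → Spec_max_2d array (max_2d array)

-- ===== LEMMAS AND PROOFS =====

-- proof-side names for A's fold functions and for a per-row "first strict argmax" fold
def fRow (best : Option (Int × Int)) (ce : Int × Int) : Option (Int × Int) :=
  match best with
  | none => some (ce.2, ce.1)
  | some b => if ce.2 > b.1 then some (ce.2, ce.1) else some b

def fInner (r : Int) (st2 : Option Int × Option (Int × Int)) (ce : Int × Int) :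
    Option Int × Option (Int × Int) :=
  if (match st2.1 with | none => true | some m => decide (ce.2 > m)) then
    (some ce.2, some (ce.1, r))
  else st2

def fOutA (st : Option Int × Option (Int × Int)) (re : Int × List Int) :
    Option Int × Option (Int × Int) :=
  (PySem.List.enumerate re.2).foldl (fInner re.1) st

def rowBest (erow : List Int) : Option (Int × Int) :=
  (PySem.List.enumerate erow).foldl fRow none

def fOutB (st : Option Int × Option (Int × Int)) (re : Int × List Int) :
    Option Int × Option (Int × Int) :=
  match rowBest re.2 with
  | none => st
  | some rb =>
    if (match st.1 with | none => true | some bv => decide (rb.1 > bv)) then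
      (some rb.1, some (rb.2, re.1))
    else st

lemma fRow_none (ce : Int × Int) : fRow none ce = some (ce.2, ce.1) := rfl
lemma fRow_some (b : Int × Int) (ce : Int × Int) :
    fRow (some b) ce = if ce.2 > b.1 then some (ce.2, ce.1) else some b := rfl

-- fRow's fold started from an accumulated best combines with the fresh row winner
lemma rowBest_acc (xs : List Int) (s b c : Int) :
    (PySem.List.enumerate xs s).foldl fRow (some (b, c))
    = match (PySem.List.enumerate xs s).foldl fRow none with
      | none => some (b, c)
      | some (v, c') => if v > b then some (v, c') else some (b, c) := by
  induction xs generalizing s b c with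
  | nil => simp [PySem.List.enumerate]
  | cons x xs ih =>
    rw [PySem.List.enumerate_cons, List.foldl_cons, List.foldl_cons, fRow_none, fRow_some]
    simp only
    by_cases h : x > b
    · rw [if_pos h, ih]
      rcases hr : (PySem.List.enumerate xs (s+1)).foldl fRow none with _ | ⟨v, c'⟩
      · simp [h]
      · simp only
        by_cases h2 : v > x
        · have : v > b := by omega
          simp [h2, this]
        · simp [h2, h]
    · rw [if_neg h, ih, ih]
      rcases hr : (PySem.List.enumerate xs (s+1)).foldl fRow none with _ | ⟨v, c'⟩
      · simp [h]
      · simp only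
        by_cases h2 : v > x
        · by_cases h3 : v > b <;> simp [h2, h3]
        · have : ¬ v > b := by omega
          simp [h2, this, h]

-- A's inner loop over one row equals combining the state with the row's winner
lemma inner_eq' (xs : List Int) (s r : Int) (m : Option Int) (p : Option (Int × Int)) :
    (PySem.List.enumerate xs s).foldl (fInner r) (m, p)
    = match (PySem.List.enumerate xs s).foldl fRow none with
      | none => (m, p)
      | some rb =>
        if (match m with | none => true | some bv => decide (rb.1 > bv)) then
          (some rb.1, some (rb.2, r))
        else (m, p) := by
  induction xs generalizing s m p with
  | nil => simp [PySem.List.enumerate]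
  | cons x xs ih =>
    rw [PySem.List.enumerate_cons, List.foldl_cons, List.foldl_cons, fRow_none]
    rw [rowBest_acc]
    show (PySem.List.enumerate xs (s+1)).foldl (fInner r) (fInner r (m, p) (s, x)) = _
    rcases m with _ | m'
    · rw [show fInner r ((none : Option Int), p) (s, x) = (some x, some (s, r)) from rfl, ih]
      rcases hr : (PySem.List.enumerate xs (s+1)).foldl fRow none with _ | ⟨v, c'⟩
      · simp
      · simp only
        by_cases h2 : v > x <;> simp [h2]
    · by_cases h : x > m'
      · rw [show fInner r (some m', p) (s, x) = if x > m' then (some x, some (s, r)) else (some m', p) by simp [fInner],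
            if_pos h, ih]
        rcases hr : (PySem.List.enumerate xs (s+1)).foldl fRow none with _ | ⟨v, c'⟩
        · simp [h]
        · simp only
          by_cases h2 : v > x
          · have : v > m' := by omega
            simp [h2, this]
          · simp [h2, h]
      · rw [show fInner r (some m', p) (s, x) = if x > m' then (some x, some (s, r)) else (some m', p) by simp [fInner],
            if_neg h, ih]
        rcases hr : (PySem.List.enumerate xs (s+1)).foldl fRow none with _ | ⟨v, c'⟩
        · simp [h]
        · simp only
          by_cases h2 : v > x
          · simp [h2]
          · have : ¬ v > m' := by omega
            simp [h2, h, this]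

lemma outer_eq (array : List (List Int)) (r : Int) (st : Option Int × Option (Int × Int)) :
    (PySem.List.enumerate array r).foldl fOutA st
    = (PySem.List.enumerate array r).foldl fOutB st := by
  induction array generalizing r st with
  | nil => rfl
  | cons row rows ih =>
    rw [PySem.List.enumerate_cons, List.foldl_cons, List.foldl_cons]
    have h1 : fOutA st (r, row) = fOutB st (r, row) := by
      show (PySem.List.enumerate row).foldl (fInner r) st = _
      rw [show st = (st.1, st.2) from rfl, inner_eq' row 0 r st.1 st.2]
      rfl
    rw [h1, ih]

-- the per-row winner is the row maximum together with its first index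
lemma rowBest_spec (xs : List Int) (s : Int) :
    ((PySem.List.enumerate xs s).foldl fRow none = none ∧ xs = []) ∨
    (∃ v k, (PySem.List.enumerate xs s).foldl fRow none = some (v, s + (k : Nat)) ∧
      v ∈ xs ∧ (∀ x ∈ xs, x ≤ v) ∧ PySem.List.index? xs v = some k) := by
  induction xs generalizing s with
  | nil => left; exact ⟨rfl, rfl⟩
  | cons x xs ih =>
    right
    rw [PySem.List.enumerate_cons, List.foldl_cons, fRow_none]
    simp only
    rw [rowBest_acc]
    rcases ih (s + 1) with ⟨hn, hxs⟩ | ⟨v, k, hv, hmem, hle, hidx⟩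
    · rw [hn]; subst hxs
      exact ⟨x, 0, by simp, by simp, by simp, PySem.List.index?_cons_self x []⟩
    · rw [hv]
      by_cases h : v > x
      · refine ⟨v, k + 1, ?_, by simp [hmem], ?_, ?_⟩
        · simp only [if_pos h]; congr 2; push_cast; ring
        · intro y hy
          rcases List.mem_cons.mp hy with rfl | hy
          · omega
          · exact hle y hy
        · rw [PySem.List.index?_cons_of_ne xs (show x ≠ v by omega), hidx]; rfl
      · refine ⟨x, 0, ?_, by simp, ?_, PySem.List.index?_cons_self x xs⟩
        · simp only [if_neg h]; norm_num
        · intro y hy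
          rcases List.mem_cons.mp hy with rfl | hy
          · omega
          · have := hle y hy; omega

-- accumulation lemma for the outer two-pass fold
lemma outerB_acc (rows : List (List Int)) (r b : Int) (p : Option (Int × Int)) :
    (PySem.List.enumerate rows r).foldl fOutB (some b, p)
    = match (PySem.List.enumerate rows r).foldl fOutB (none, none) with
      | (none, _) => (some b, p)
      | (some v, q) => if v > b then (some v, q) else (some b, p) := by
  induction rows generalizing r b p with
  | nil => rfl
  | cons row rows ih =>
    rw [PySem.List.enumerate_cons, List.foldl_cons, List.foldl_cons]
    rcases hrb : rowBest row with _ | ⟨v, c⟩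
    · rw [show fOutB (some b, p) (r, row) = (some b, p) by simp [fOutB, hrb],
          show fOutB ((none : Option Int), (none : Option (Int × Int))) (r, row) = (none, none) by simp [fOutB, hrb]]
      exact ih (r + 1) b p
    · rw [show fOutB ((none : Option Int), (none : Option (Int × Int))) (r, row) = (some v, some (c, r)) by simp [fOutB, hrb]]
      rw [show fOutB (some b, p) (r, row)
            = if v > b then (some v, some (c, r)) else (some b, p) by simp [fOutB, hrb]]
      rcases hr : (PySem.List.enumerate rows (r+1)).foldl fOutB (none, none) with ⟨m, q⟩
      have IH : ∀ (b' : Int) (p' : Option (Int × Int)),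
          (PySem.List.enumerate rows (r+1)).foldl fOutB (some b', p')
          = match (m, q) with
            | (none, _) => (some b', p')
            | (some v', q') => if v' > b' then (some v', q') else (some b', p') := by
        intro b' p'; rw [ih (r+1) b' p', hr]
      by_cases h : v > b
      · rw [if_pos h]
        simp only [IH]
        rcases m with _ | m'
        · simp [h]
        · simp only
          by_cases h2 : m' > v
          · have : m' > b := by omega
            simp [h2, this]
          · simp [h2, h]
      · rw [if_neg h]
        simp only [IH]
        rcases m with _ | m'
        · simp [h]
        · simp only
          by_cases h2 : m' > v
          · by_cases h3 : m' > b <;> simp [h2, h3]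
          · have : ¬ m' > b := by omega
            simp [h2, h, this]

-- main invariant: the two-pass fold yields the global max and exactly B's search result
lemma outerB_spec (rows : List (List Int)) (r : Int) :
    ((PySem.List.enumerate rows r).foldl fOutB (none, none) = (none, none) ∧
      ∀ row ∈ rows, row = []) ∨
    (∃ m c rr, (PySem.List.enumerate rows r).foldl fOutB (none, none) = (some m, some (c, rr)) ∧
      m ∈ rows.flatMap (fun row => row) ∧
      (∀ row ∈ rows, ∀ x ∈ row, x ≤ m) ∧
      findRowB m (PySem.List.enumerate rows r) = some (c, rr)) := by
  induction rows generalizing r with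
  | nil => left; exact ⟨rfl, by simp⟩
  | cons row rows ih =>
    rw [PySem.List.enumerate_cons, List.foldl_cons]
    rcases rowBest_spec row 0 with ⟨hn, hrow⟩ | ⟨v, k, hv, hmem, hle, hidx⟩
    · -- row is empty: the state is unchanged and the search skips it
      have h0 : fOutB ((none : Option Int), (none : Option (Int × Int))) (r, row)
          = (none, none) := by simp [fOutB, rowBest, hn]
      rw [h0]
      rcases ih (r + 1) with ⟨h1, h2⟩ | ⟨m, c, rr, h1, h2, h3, h4⟩
      · left
        refine ⟨h1, ?_⟩
        intro rw hrw
        rcases List.mem_cons.mp hrw with rfl | hrw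
        · exact hrow
        · exact h2 _ hrw
      · right
        refine ⟨m, c, rr, h1, ?_, ?_, ?_⟩
        · rw [List.flatMap_cons]; exact List.mem_append_right _ h2
        · intro rw hrw
          rcases List.mem_cons.mp hrw with rfl | hrw
          · rw [hrow]; intro x hx; cases hx
          · exact h3 _ hrw
        · simp only [findRowB]
          rw [if_neg (by rw [hrow]; simp), h4]
    · -- row has a winner (v, k) : v is the row max, k its first index
      have hvk : rowBest row = some (v, (k : Int)) := by
        rw [rowBest, hv]; norm_num
      have h0 : fOutB ((none : Option Int), (none : Option (Int × Int))) (r, row)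
          = (some v, some (((k : Nat) : Int), r)) := by simp [fOutB, hvk]
      rw [h0, outerB_acc]
      have hcont : row.contains v = true := List.contains_iff_mem.mpr hmem
      have hvflat : v ∈ (row :: rows).flatMap (fun row => row) := by
        rw [List.flatMap_cons]; exact List.mem_append_left _ hmem
      rcases ih (r + 1) with ⟨h1, h2⟩ | ⟨m, c, rr, h1, h2, h3, h4⟩
      · -- all later rows empty: this row's winner is the global one
        rw [h1]
        right
        refine ⟨v, (k : Int), r, rfl, hvflat, ?_, ?_⟩
        · intro rw hrw
          rcases List.mem_cons.mp hrw with rfl | hrw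
          · exact hle
          · intro x hx; rw [h2 _ hrw] at hx; cases hx
        · simp only [findRowB]
          rw [if_pos hcont, hidx]; rfl
      · rw [h1]
        right
        by_cases h : m > v
        · -- a later winner m beats v; m cannot be in this row (all ≤ v < m)
          refine ⟨m, c, rr, by simp [h], ?_, ?_, ?_⟩
          · rw [List.flatMap_cons]; exact List.mem_append_right _ h2
          · intro rw hrw
            rcases List.mem_cons.mp hrw with rfl | hrw
            · intro x hx; have := hle x hx; omega
            · exact h3 _ hrw
          · simp only [findRowB]
            rw [if_neg ?_, h4]
            simp only [List.contains_iff_mem]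
            intro hmm; have := hle m hmm; omega
        · -- v wins (ties kept at the earlier row): the search stops at this row
          refine ⟨v, (k : Int), r, by simp [h], hvflat, ?_, ?_⟩
          · intro rw hrw
            rcases List.mem_cons.mp hrw with rfl | hrw
            · exact hle
            · intro x hx; have := h3 _ hrw x hx; omega
          · simp only [findRowB]
            rw [if_pos hcont, hidx]; rfl

-- ===== VERDICT (by name: the statement is the Claim_ definition above) =====
theorem max_2d_spec : Claim_equal_max_2d := by
  intro array _
  show max_2d array = max_2d_alt array
  have hA : max_2d array
      = ((PySem.List.enumerate array).foldl fOutB (none, none)).2 := by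
    show ((PySem.List.enumerate array).foldl fOutA (none, none)).2 = _
    rw [outer_eq]
  rw [hA]
  rcases outerB_spec array 0 with ⟨h1, h2⟩ | ⟨m, c, rr, h1, h2, h3, h4⟩
  · rw [h1]
    have hflat : array.flatMap (fun row => row) = [] := by
      rw [List.flatMap_eq_nil_iff]; exact h2
    show (none : Option (Int × Int)) = max_2d_alt array
    rw [max_2d_alt]
    simp only [hflat]
    rw [show PySem.List.max? ([] : List Int) (fun x => x) = none from rfl]
  · rw [h1]
    have hne : array.flatMap (fun row => row) ≠ [] := by
      intro h; rw [h] at h2; cases h2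
    obtain ⟨m', hm'⟩ := Option.ne_none_iff_exists'.mp
      (fun h => hne ((PySem.List.max?_eq_none_iff (array.flatMap (fun row => row)) (fun x : Int => x)).mp h))
    have hm'mem : m' ∈ array.flatMap (fun row => row) := PySem.List.max?_mem hm'
    have h5 : m' ≤ m := by
      obtain ⟨row, hrow, hx⟩ := List.mem_flatMap.mp hm'mem
      exact h3 row hrow m' hx
    have h6 : m ≤ m' := PySem.List.max?_isMax hm' m h2
    have hmm : m' = m := le_antisymm h5 h6
    show some (c, rr) = max_2d_alt array
    rw [max_2d_alt]
    simp only [hm', hmm, h4]
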